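-- pv_equiv track=rewrite | github.com/lmasarulshindol/stable-diffusion-webui-forge | tools/compare_checkpoints.py | _pick_checkpoint_title
-- ===== SOURCE A (Python) =====
-- from typing import Any
--
-- def _pick_checkpoint_title(models: list[dict[str, Any]], query: str) -> str:
--     q = query.strip().lower()
--     if not q:
--         raise ValueError("checkpoint名が空です")
--
--     # title 完全一致（大小無視）
--     for m in models:
--         title = str(m.get("title", ""))
--         if title.lower() == q:
--             return title
--
--     # 末尾一致（ファイル名指定を許容）
--     suffix_matches: list[str] = []
--     for m in models:
--         title = str(m.get("title", ""))
--         if title.lower().endswith(q):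
--             suffix_matches.append(title)
--     if len(suffix_matches) == 1:
--         return suffix_matches[0]
--
--     # 部分一致（候補1つなら採用）
--     contains_matches: list[str] = []
--     for m in models:
--         title = str(m.get("title", ""))
--         if q in title.lower():
--             contains_matches.append(title)
--     if len(contains_matches) == 1:
--         return contains_matches[0]
--
--     candidates = suffix_matches or contains_matches
--     if not candidates:
--         raise RuntimeError(f"checkpoint '{query}' が見つかりません。--list-models で一覧を確認してください。")
--     preview = "\n".join(f"- {c}" for c in candidates[:40])
--     raise RuntimeError(f"checkpoint '{query}' の候補が複数あります（より具体的に指定してください）:\n{preview}")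
-- ===== SOURCE B (Python) =====
-- def _pick_checkpoint_title(models, query):
--     q = query.strip().lower()
--     if not q:
--         raise ValueError("checkpoint名が空です")
--
--     exact = []
--     suffix = []
--     contains = []
--     for m in models:
--         title = str(m.get("title", ""))
--         tl = title.lower()
--         if tl == q:
--             exact.append(title)
--         if tl.endswith(q):
--             suffix.append(title)
--         if q in tl:
--             contains.append(title)
--
--     if exact:
--         return exact[0]
--     if len(suffix) == 1:
--         return suffix[0]
--     if len(contains) == 1:
--         return contains[0]
--
--     candidates = suffix or contains
--     if not candidates:
--         raise RuntimeError(f"checkpoint '{query}' が見つかりません。--list-models で一覧を確認してください。")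
--     preview = "\n".join(f"- {c}" for c in candidates[:40])
--     raise RuntimeError(f"checkpoint '{query}' の候補が複数あります（より具体的に指定してください）:\n{preview}")
-- ===== Notes on version B (the rewrite author's own statement) =====
-- stated objective: simpler
-- what changed: A scans models up to three separate times (early-return exact loop, then a suffix-filter pass, then a contains-filter pass); B makes a single pass computing each title and its lowercase once and collecting the three candidate lists simultaneously, then applies the same priority.
import Mathlib
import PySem

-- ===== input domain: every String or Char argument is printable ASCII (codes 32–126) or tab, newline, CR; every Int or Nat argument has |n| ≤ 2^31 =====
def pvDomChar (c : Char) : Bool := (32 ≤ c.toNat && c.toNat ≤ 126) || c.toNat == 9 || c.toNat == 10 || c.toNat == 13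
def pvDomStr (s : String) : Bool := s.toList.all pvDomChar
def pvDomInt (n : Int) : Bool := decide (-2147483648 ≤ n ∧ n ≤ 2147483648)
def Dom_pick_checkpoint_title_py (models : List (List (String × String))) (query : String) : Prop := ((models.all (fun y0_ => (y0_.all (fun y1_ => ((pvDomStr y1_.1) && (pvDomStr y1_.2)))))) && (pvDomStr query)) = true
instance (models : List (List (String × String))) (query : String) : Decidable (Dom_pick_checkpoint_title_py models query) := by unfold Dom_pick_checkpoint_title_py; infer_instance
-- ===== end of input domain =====

-- B replaces A's three separate scans over models (early-return exact loop, suffix pass,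
-- contains pass) by ONE pass that computes each title / lowercase once and collects the three
-- candidate lists together, then applies the same priority (objective: simpler).
-- On inputs where A raises (empty stripped query; no match; ambiguous match) B raises the
-- identical exceptions; those inputs are outside Pre_.

-- str(m.get("title", "")): first-match association-list lookup, default "" (values are strings)
def pvTitle (m : List (String × String)) : String := (m.lookup "title").getD ""

-- ===== PORT A =====
-- first loop: return the first title with title.lower() == q
def pvExactLoop (q : String) : List (List (String × String)) → Option String
  | [] => none
  | m :: rest =>
      let title := pvTitle m
      if PySem.Str.lower title == q then some title else pvExactLoop q rest

def pick_checkpoint_title_py (models : List (List (String × String))) (query : String) : String :=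
  let q := PySem.Str.lower (PySem.Str.strip query)
  if q == "" then ""   -- raise ValueError: outside Pre_
  else
    match pvExactLoop q models with
    | some title => title
    | none =>
      let suffix_matches := models.foldl (fun acc m =>
        let title := pvTitle m
        if PySem.Str.endswith (PySem.Str.lower title) q then acc ++ [title] else acc) []
      if suffix_matches.length == 1 then suffix_matches.getD 0 ""
      else
        let contains_matches := models.foldl (fun acc m =>
          let title := pvTitle m
          if PySem.Str.isIn q (PySem.Str.lower title) then acc ++ [title] else acc) []
        if contains_matches.length == 1 then contains_matches.getD 0 ""
        else ""   -- raise RuntimeError (not found / ambiguous): outside Pre_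

-- ===== PORT B =====
def pick_checkpoint_title_py_alt (models : List (List (String × String))) (query : String) : String :=
  let q := PySem.Str.lower (PySem.Str.strip query)
  if q == "" then ""   -- raise ValueError: outside Pre_
  else
    let (exact, suffix, contains) := models.foldl (fun acc m =>
      let title := pvTitle m
      let tl := PySem.Str.lower title
      (if tl == q then acc.1 ++ [title] else acc.1,
       if PySem.Str.endswith tl q then acc.2.1 ++ [title] else acc.2.1,
       if PySem.Str.isIn q tl then acc.2.2 ++ [title] else acc.2.2)) ([], [], [])
    match exact with
    | title :: _ => title
    | [] =>
      if suffix.length == 1 then suffix.getD 0 ""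
      else if contains.length == 1 then contains.getD 0 ""
      else ""   -- raise RuntimeError (not found / ambiguous): outside Pre_

-- ===== PRECONDITION & SPEC =====
-- Pre_: exactly the inputs where A returns normally — the stripped lowercased query is
-- nonempty and there is an exact match, or a unique suffix match, or a unique contains match.
def Pre_pick_checkpoint_title_py (models : List (List (String × String))) (query : String) : Prop :=
  let q := PySem.Str.lower (PySem.Str.strip query)
  let titles := models.map pvTitle
  q ≠ "" ∧
    (titles.any (fun t => PySem.Str.lower t == q) = true ∨
     (titles.filter (fun t => PySem.Str.endswith (PySem.Str.lower t) q)).length = 1 ∨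
     (titles.filter (fun t => PySem.Str.isIn q (PySem.Str.lower t))).length = 1)
instance (models : List (List (String × String))) (query : String) : Decidable (Pre_pick_checkpoint_title_py models query) := by unfold Pre_pick_checkpoint_title_py; infer_instance

def pvWitness_pick_checkpoint_title_py : (List (List (String × String))) × String :=
  ([[("title", "Model A.safetensors")], [("title", "Other B")]], "model a.safetensors")

def Spec_pick_checkpoint_title_py (models : List (List (String × String))) (query : String) (out : String) : Prop := out = pick_checkpoint_title_py_alt models query
instance (models : List (List (String × String))) (query : String) (out : String) : Decidable (Spec_pick_checkpoint_title_py models query out) := by unfold Spec_pick_checkpoint_title_py; infer_instance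

-- ===== CLAIM (what is proved, stated in full; the proofs are below) =====
def Claim_equal_pick_checkpoint_title_py : Prop := ∀ (models : List (List (String × String))) (query : String), Dom_pick_checkpoint_title_py models query → Pre_pick_checkpoint_title_py models query → Spec_pick_checkpoint_title_py models query (pick_checkpoint_title_py models query)

-- ===== LEMMAS AND PROOFS =====

-- A's first loop returns the head of the exact-match filter over the titles
lemma pvExactLoop_eq (q : String) (models : List (List (String × String))) :
    pvExactLoop q models =
      ((models.map pvTitle).filter (fun t => PySem.Str.lower t == q)).head? := by
  induction models with
  | nil => rfl
  | cons m rest ih =>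
      simp only [pvExactLoop, List.map_cons, List.filter_cons]
      by_cases h : (PySem.Str.lower (pvTitle m) == q) = true
      · simp [h]
      · simp only [h, if_false, Bool.false_eq_true]
        simpa using ih

-- B's single fold computes the three filtered title lists simultaneously
lemma pvFoldB_eq (q : String) (models : List (List (String × String)))
    (e s c : List String) :
    models.foldl (fun acc m =>
      let title := pvTitle m
      let tl := PySem.Str.lower title
      ((if tl == q then acc.1 ++ [title] else acc.1 : List String),
       (if PySem.Str.endswith tl q then acc.2.1 ++ [title] else acc.2.1 : List String),
       (if PySem.Str.isIn q tl then acc.2.2 ++ [title] else acc.2.2 : List String))) (e, s, c) =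
      (e ++ (models.map pvTitle).filter (fun t => PySem.Str.lower t == q),
       s ++ (models.map pvTitle).filter (fun t => PySem.Str.endswith (PySem.Str.lower t) q),
       c ++ (models.map pvTitle).filter (fun t => PySem.Str.isIn q (PySem.Str.lower t))) := by
  induction models generalizing e s c with
  | nil => simp
  | cons m rest ih =>
      simp only [List.foldl_cons, List.map_cons, List.filter_cons]
      rw [ih]
      simp only [Prod.mk.injEq]
      refine ⟨?_, ?_, ?_⟩ <;> split_ifs <;> simp

-- A's suffix / contains folds are the same filters
lemma pvFoldFilter_eq (p : String → Bool) (models : List (List (String × String)))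
    (acc : List String) :
    models.foldl (fun acc m =>
      let title := pvTitle m
      if p title then acc ++ [title] else acc) acc =
      acc ++ (models.map pvTitle).filter p := by
  induction models generalizing acc with
  | nil => simp
  | cons m rest ih =>
      simp only [List.foldl_cons, List.map_cons, List.filter_cons]
      by_cases h : p (pvTitle m) = true <;> simp [h, ih]

-- the two ports agree on every input (both return "" on the raise branches)
lemma pvPick_eq (models : List (List (String × String))) (query : String) :
    pick_checkpoint_title_py models query = pick_checkpoint_title_py_alt models query := by
  unfold pick_checkpoint_title_py pick_checkpoint_title_py_alt
  dsimp only
  generalize PySem.Str.lower (PySem.Str.strip query) = q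
  rw [pvFoldB_eq, pvExactLoop_eq,
      pvFoldFilter_eq (fun t => PySem.Str.endswith (PySem.Str.lower t) q),
      pvFoldFilter_eq (fun t => PySem.Str.isIn q (PySem.Str.lower t))]
  simp only [List.nil_append]
  by_cases h0 : (q == "") = true
  · simp only [h0, if_true]
  · simp only [h0, Bool.false_eq_true, if_false]
    cases he : (models.map pvTitle).filter (fun t => PySem.Str.lower t == q) with
    | nil => rfl
    | cons t ts => rfl

-- ===== VERDICT (by name: the statement is the Claim_ definition above) =====
theorem pick_checkpoint_title_py_spec : Claim_equal_pick_checkpoint_title_py := by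
  intro models query _ _
  exact pvPick_eq models query
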